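-- pv_equiv track=rewrite | github.com/muzhicaomingwang/ai-ideas | scripts/outlook_ai_sorter/outlook_ai_sorter.py | _group_counts
-- ===== SOURCE A (Python) =====
-- from typing import Any, Dict, Iterable, List, Optional, Tuple
--
-- def _domain(address: str) -> str:
--     address = (address or "").strip().lower()
--     return address.split("@", 1)[1] if "@" in address else ""
--
-- def _group_counts(items: Iterable[Dict[str, Any]]) -> Tuple[Dict[str, int], Dict[str, int]]:
--     by_addr: Dict[str, int] = {}
--     by_domain: Dict[str, int] = {}
--     for it in items:
--         addr = (it.get("from") or "").strip().lower()
--         if not addr: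
--             continue
--         by_addr[addr] = by_addr.get(addr, 0) + 1
--         dom = _domain(addr)
--         if dom:
--             by_domain[dom] = by_domain.get(dom, 0) + 1
--     return by_addr, by_domain
-- ===== SOURCE B (Python) =====
-- from typing import Any, Dict, Iterable, Tuple
--
--
-- def _domain(address: str) -> str:
--     address = (address or "").strip().lower()
--     return address.split("@", 1)[1] if "@" in address else ""
--
--
-- def _group_counts(items: Iterable[Dict[str, Any]]) -> Tuple[Dict[str, int], Dict[str, int]]:
--     by_addr: Dict[str, int] = {}
--     for it in items:
--         addr = (it.get("from") or "").strip().lower()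
--         if addr:
--             by_addr[addr] = by_addr.get(addr, 0) + 1
--     by_domain: Dict[str, int] = {}
--     for addr, n in by_addr.items():
--         dom = _domain(addr)
--         if dom:
--             by_domain[dom] = by_domain.get(dom, 0) + n
--     return by_addr, by_domain
-- ===== Notes on version B (the rewrite author's own statement) =====
-- stated objective: alternative
-- what changed: by_domain is no longer counted per email: B first builds by_addr in one pass, then in a second pass rolls by_domain up from by_addr.items() by adding each distinct address's count to its domain (first-address-appearance order provably equals A's first-email order).
import Mathlib
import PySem

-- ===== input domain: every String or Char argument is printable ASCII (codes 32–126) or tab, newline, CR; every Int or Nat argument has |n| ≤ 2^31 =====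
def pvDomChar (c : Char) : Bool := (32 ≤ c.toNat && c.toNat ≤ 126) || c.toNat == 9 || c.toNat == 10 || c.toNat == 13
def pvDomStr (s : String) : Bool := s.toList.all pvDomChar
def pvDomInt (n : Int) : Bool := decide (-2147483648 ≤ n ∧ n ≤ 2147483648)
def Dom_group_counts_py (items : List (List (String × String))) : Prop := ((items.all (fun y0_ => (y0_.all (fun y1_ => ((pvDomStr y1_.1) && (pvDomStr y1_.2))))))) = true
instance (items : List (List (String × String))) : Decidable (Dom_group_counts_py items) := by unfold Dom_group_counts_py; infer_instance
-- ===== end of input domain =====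

-- B derives by_domain by rolling up by_addr.items() (adding each distinct address's count to
-- its domain) instead of counting domains per email; alternative decomposition, same cost.

-- ===== PORT A =====
-- addr = (it.get("from") or "").strip().lower()   (values are strings, so `or ""` only replaces a missing key / empty string by "")
def pyAddr (it : List (String × String)) : String :=
  PySem.Str.lower (PySem.Str.strip (((PySem.Dict.mk it).get? "from").getD ""))

-- _domain; the [1] index is guarded by the `"@" in address` test, so the `.getD ""` default is unreachable
def pyDomain (address : String) : String :=
  let a := PySem.Str.lower (PySem.Str.strip address)
  if PySem.Str.isIn "@" a then (((PySem.Str.splitMax? a "@" 1).getD [])[1]?).getD "" else ""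

def group_counts_py (items : List (List (String × String))) : (List (String × Int)) × (List (String × Int)) :=
  let r := items.foldl (fun s it =>
      let addr := pyAddr it
      if addr == "" then s
      else
        let byA := s.1.insert addr (s.1.getD addr 0 + 1)
        let dom := pyDomain addr
        let byD := if dom == "" then s.2 else s.2.insert dom (s.2.getD dom 0 + 1)
        (byA, byD))
    ((PySem.Dict.empty : PySem.Dict String Int), (PySem.Dict.empty : PySem.Dict String Int))
  (r.1.items, r.2.items)

-- ===== PORT B =====
def group_counts_py_alt (items : List (List (String × String))) : (List (String × Int)) × (List (String × Int)) :=
  let byAddr := items.foldl (fun d it =>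
      let addr := pyAddr it
      if addr != "" then d.insert addr (d.getD addr 0 + 1) else d)
    (PySem.Dict.empty : PySem.Dict String Int)
  let byDomain := byAddr.items.foldl (fun d p =>
      let dom := pyDomain p.1
      if dom != "" then d.insert dom (d.getD dom 0 + p.2) else d)
    (PySem.Dict.empty : PySem.Dict String Int)
  (byAddr.items, byDomain.items)

-- ===== PRECONDITION & SPEC =====
def Spec_group_counts_py (items : List (List (String × String))) (out : (List (String × Int)) × (List (String × Int))) : Prop := out = group_counts_py_alt items
instance (items : List (List (String × String))) (out : (List (String × Int)) × (List (String × Int))) : Decidable (Spec_group_counts_py items out) := by unfold Spec_group_counts_py; infer_instance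

-- ===== CLAIM (what is proved, stated in full; the proofs are below) =====
def Claim_equal_group_counts_py : Prop := ∀ (items : List (List (String × String))), Dom_group_counts_py items → Spec_group_counts_py items (group_counts_py items)

-- ===== LEMMAS AND PROOFS =====

-- one step of B's roll-up loop (and, at weight 1, of A's by_domain counting)
def dstep (d : PySem.Dict String Int) (p : String × Int) : PySem.Dict String Int :=
  if pyDomain p.1 == "" then d else d.insert (pyDomain p.1) (d.getD (pyDomain p.1) 0 + p.2)

-- one step of the shared by_addr loop
def astep (d : PySem.Dict String Int) (a : String) : PySem.Dict String Int :=
  if a == "" then d else d.insert a (d.getD a 0 + 1)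

theorem pyDomain_empty : pyDomain "" = "" := by decide

theorem dstep_skip (d : PySem.Dict String Int) (p : String × Int) (h : pyDomain p.1 = "") :
    dstep d p = d := by simp [dstep, h]

theorem contains_dstep (d : PySem.Dict String Int) (p : String × Int) (k : String)
    (h : d.contains k = true) : (dstep d p).contains k = true := by
  unfold dstep
  split
  · exact h
  · simp [PySem.Dict.contains_insert, h]

theorem roll_map_skip (a : String) (v : Int) (h : pyDomain a = "")
    (L : List (String × Int)) (d : PySem.Dict String Int) :
    (L.map (fun p => if p.1 == a then (a, v) else p)).foldl dstep d = L.foldl dstep d := by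
  induction L generalizing d with
  | nil => rfl
  | cons q t ih =>
    simp only [List.map_cons, List.foldl_cons]
    by_cases hq : q.1 = a
    · rw [if_pos (by simp [hq]), dstep_skip d (a, v) h, dstep_skip d q (by rw [hq, h])]
      exact ih d
    · rw [if_neg (by simp [hq])]
      exact ih (dstep d q)

theorem insert_comm_of_contains (d : PySem.Dict String Int) (k k' : String) (hne : k' ≠ k)
    (hc : d.contains k = true) (x y : Int) :
    (d.insert k x).insert k' y = (d.insert k' y).insert k x := by
  apply PySem.Dict.ext
  by_cases hk' : d.contains k' = true
  · rw [PySem.Dict.items_insert_of_contains _ y (by simp [PySem.Dict.contains_insert, hk']),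
        PySem.Dict.items_insert_of_contains _ x hc,
        PySem.Dict.items_insert_of_contains _ x (by simp [PySem.Dict.contains_insert, hc]),
        PySem.Dict.items_insert_of_contains _ y hk']
    simp only [List.map_map]
    apply List.map_congr_left
    intro p _
    simp only [Function.comp_apply, beq_iff_eq]
    split_ifs <;> simp_all
  · have hf : d.contains k' = false := eq_false_of_ne_true hk'
    rw [PySem.Dict.items_insert_of_not_contains _ y (by simp [PySem.Dict.contains_insert, hf, hne]),
        PySem.Dict.items_insert_of_contains _ x hc,
        PySem.Dict.items_insert_of_contains _ x (by simp [PySem.Dict.contains_insert, hc]),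
        PySem.Dict.items_insert_of_not_contains _ y hf]
    simp only [List.map_append, List.map_cons, List.map_nil]
    congr 1
    simp [hne]

theorem commute_step (d : PySem.Dict String Int) (dom : String)
    (hc : d.contains dom = true) (w : Int) (p : String × Int) :
    dstep (d.insert dom (d.getD dom 0 + w)) p
      = (dstep d p).insert dom ((dstep d p).getD dom 0 + w) := by
  by_cases h0 : pyDomain p.1 = ""
  · rw [dstep_skip _ p h0, dstep_skip d p h0]
  · have hb : (pyDomain p.1 == "") = false := by simp [h0]
    by_cases heq : pyDomain p.1 = dom
    · rw [heq] at hb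
      simp only [dstep, heq, hb, Bool.false_eq_true, if_false]
      rw [PySem.Dict.getD_insert_self, PySem.Dict.insert_insert_self,
          PySem.Dict.getD_insert_self, PySem.Dict.insert_insert_self,
          show d.getD dom 0 + w + p.2 = d.getD dom 0 + p.2 + w by ring]
    · simp only [dstep, hb, Bool.false_eq_true, if_false]
      have e1 : (d.insert dom (d.getD dom 0 + w)).getD (pyDomain p.1) 0
          = d.getD (pyDomain p.1) 0 := PySem.Dict.getD_insert_of_ne d _ _ heq
      have e2 : (d.insert (pyDomain p.1) (d.getD (pyDomain p.1) 0 + p.2)).getD dom 0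
          = d.getD dom 0 := PySem.Dict.getD_insert_of_ne d _ _ (Ne.symm heq)
      rw [e1, e2]
      exact insert_comm_of_contains d dom (pyDomain p.1) heq hc _ _

theorem roll_insert_comm (L : List (String × Int)) (d : PySem.Dict String Int) (dom : String)
    (hc : d.contains dom = true) (w : Int) :
    L.foldl dstep (d.insert dom (d.getD dom 0 + w))
      = (L.foldl dstep d).insert dom ((L.foldl dstep d).getD dom 0 + w) := by
  induction L generalizing d with
  | nil => rfl
  | cons p t ih =>
    simp only [List.foldl_cons]
    rw [commute_step d dom hc w p]
    exact ih (dstep d p) (contains_dstep d p dom hc)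

theorem roll_inc (L : List (String × Int)) (a : String) (n : Int)
    (hnd : (L.map (·.1)).Nodup) (hmem : (a, n) ∈ L) (hd : pyDomain a ≠ "")
    (d : PySem.Dict String Int) :
    (L.map (fun p => if p.1 == a then (a, n + 1) else p)).foldl dstep d
      = (L.foldl dstep d).insert (pyDomain a) ((L.foldl dstep d).getD (pyDomain a) 0 + 1) := by
  induction L generalizing d with
  | nil => cases hmem
  | cons q t ih =>
    simp only [List.map_cons, List.nodup_cons, List.mem_map] at hnd
    simp only [List.map_cons, List.foldl_cons]
    by_cases hq : q.1 = a
    · have hqa : q = (a, n) := by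
        rcases List.mem_cons.mp hmem with h | h
        · exact h.symm
        · exact absurd ⟨(a, n), h, by simp [hq]⟩ hnd.1
      have hts : t.map (fun p => if p.1 == a then (a, n + 1) else p) = t := by
        conv_rhs => rw [← List.map_id t]
        apply List.map_congr_left
        intro p hp
        have hpa : p.1 ≠ a := fun hpa => hnd.1 ⟨p, hp, by rw [hpa, hq]⟩
        simp [hpa]
      rw [if_pos (by simp [hq]), hts, hqa]
      have hb1 : (pyDomain a == "") = false := by simp [hd]
      have h1 : dstep d (a, n + 1)
          = (dstep d (a, n)).insert (pyDomain a) ((dstep d (a, n)).getD (pyDomain a) 0 + 1) := by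
        simp only [dstep, hb1, Bool.false_eq_true, if_false]
        rw [PySem.Dict.getD_insert_self, PySem.Dict.insert_insert_self, add_assoc]
      rw [h1]
      have hcont : (dstep d (a, n)).contains (pyDomain a) = true := by
        simp only [dstep, hb1, Bool.false_eq_true, if_false]
        exact PySem.Dict.contains_insert_self _ _ _
      exact roll_insert_comm t (dstep d (a, n)) (pyDomain a) hcont 1
    · rw [if_neg (by simp [hq])]
      have hmem' : (a, n) ∈ t := by
        rcases List.mem_cons.mp hmem with h | h
        · exact absurd (by rw [← h]) hq
        · exact h
      exact ih hnd.2 hmem' (dstep d q)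

theorem nodup_keys_astep_fold (l : List String) (d : PySem.Dict String Int)
    (h : d.keys.Nodup) : (l.foldl astep d).keys.Nodup := by
  induction l generalizing d with
  | nil => exact h
  | cons a t ih =>
    simp only [List.foldl_cons]
    apply ih
    unfold astep
    split
    · exact h
    · exact PySem.Dict.nodup_keys_insert _ _ _ h

theorem roll_aCnt (l : List String) :
    ((l.foldl astep PySem.Dict.empty).items).foldl dstep PySem.Dict.empty
      = l.foldl (fun d a => dstep d (a, 1)) PySem.Dict.empty := by
  induction l using List.reverseRecOn with
  | nil => rfl
  | append_singleton l a ih =>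
    rw [List.foldl_append, List.foldl_append]
    simp only [List.foldl_cons, List.foldl_nil]
    by_cases ha : a = ""
    · rw [show astep (l.foldl astep PySem.Dict.empty) a = l.foldl astep PySem.Dict.empty by
        simp [astep, ha]]
      rw [ih, dstep_skip _ (a, 1) (show pyDomain a = "" by rw [ha, pyDomain_empty])]
    · set D := l.foldl astep PySem.Dict.empty with hD
      rw [show astep D a = D.insert a (D.getD a 0 + 1) by simp [astep, ha]]
      by_cases hcon : D.contains a = true
      · have hget : ∃ v, D.get? a = some v := by
          rcases h : D.get? a with _ | v
          · rw [(PySem.Dict.get?_eq_none_iff_contains D a).mp h] at hcon; cases hcon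
          · exact ⟨v, rfl⟩
        rcases hget with ⟨v, hv⟩
        have hgd : D.getD a 0 = v := PySem.Dict.getD_of_get?_eq_some D 0 hv
        have hmem : (a, v) ∈ D.items := PySem.Dict.mem_items_of_get?_eq_some D hv
        rw [PySem.Dict.items_insert_of_contains _ _ hcon]
        by_cases hdom : pyDomain a = ""
        · rw [hgd, roll_map_skip a _ hdom, ih, dstep_skip _ (a, 1) hdom]
        · have hnd : (D.items.map (·.1)).Nodup := by
            simpa [PySem.Dict.keys] using
              nodup_keys_astep_fold l PySem.Dict.empty PySem.Dict.nodup_keys_empty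
          rw [hgd, roll_inc D.items a v hnd hmem hdom, ih]
          have hb2 : (pyDomain a == "") = false := by simp [hdom]
          simp only [dstep, hb2, Bool.false_eq_true, if_false]
      · have hf : D.contains a = false := eq_false_of_ne_true hcon
        rw [PySem.Dict.getD_of_not_contains D _ hf,
            PySem.Dict.items_insert_of_not_contains D _ hf, List.foldl_append]
        simp only [List.foldl_cons, List.foldl_nil]
        rw [ih]
        by_cases hdom : pyDomain a = ""
        · rw [dstep_skip _ (a, 1) hdom, dstep_skip _ (a, 0 + 1) hdom]
        · have hb3 : (pyDomain a == "") = false := by simp [hdom]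
          simp only [dstep, hb3, Bool.false_eq_true, if_false]
          norm_num


-- ===== VERDICT (by name: the statement is the Claim_ definition above) =====
theorem group_counts_py_spec : Claim_equal_group_counts_py := by
  intro items _
  unfold Spec_group_counts_py group_counts_py group_counts_py_alt
  have hA : (fun (s : PySem.Dict String Int × PySem.Dict String Int) it =>
      let addr := pyAddr it
      if addr == "" then s
      else
        let byA := s.1.insert addr (s.1.getD addr 0 + 1)
        let dom := pyDomain addr
        let byD := if dom == "" then s.2 else s.2.insert dom (s.2.getD dom 0 + 1)
        (byA, byD))
      = (fun s it => (astep s.1 (pyAddr it), dstep s.2 (pyAddr it, 1))) := by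
    funext s it
    by_cases h : pyAddr it = ""
    · simp [astep, dstep, h, pyDomain_empty]
    · have hb4 : (pyAddr it == "") = false := by simp [h]
      simp only [astep, dstep, hb4, Bool.false_eq_true, if_false]
  have hB : (fun (d : PySem.Dict String Int) it =>
      let addr := pyAddr it
      if addr != "" then d.insert addr (d.getD addr 0 + 1) else d)
      = (fun d it => astep d (pyAddr it)) := by
    funext d it
    by_cases h : pyAddr it = "" <;> simp [astep, h]
  have hBd : (fun (d : PySem.Dict String Int) (p : String × Int) =>
      let dom := pyDomain p.1
      if dom != "" then d.insert dom (d.getD dom 0 + p.2) else d) = dstep := by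
    funext d p
    by_cases h : pyDomain p.1 = "" <;> simp [dstep, h]
  rw [hA, hB, hBd,
      PySem.List.foldl_prod_mk (f := fun d it => astep d (pyAddr it))
        (g := fun d it => dstep d (pyAddr it, 1))]
  have hmap : ∀ (G : PySem.Dict String Int → String → PySem.Dict String Int),
      items.foldl (fun d it => G d (pyAddr it)) PySem.Dict.empty
        = (items.map pyAddr).foldl G PySem.Dict.empty :=
    fun G => (List.foldl_map).symm
  rw [hmap astep, hmap (fun d a => dstep d (a, 1)), ← roll_aCnt (items.map pyAddr)]
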